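-- pv_equiv track=rewrite | github.com/LA-JP-Support/hugo-boilerplate | scripts/enrich_glossary.py | collect_new_keywords
-- ===== SOURCE A (Python) =====
-- from typing import Dict, List, Sequence
--
-- def collect_new_keywords(body: str, dictionary: List[Dict[str, Sequence[str]]]) -> List[str]:
--     found: List[str] = []
--     body_lower = body.lower()
--     for entry in dictionary:
--         aliases = entry.get("aliases", [])
--         if not aliases:
--             continue
--         if any(alias.lower() in body_lower for alias in aliases):
--             found.extend(entry.get("keywords", []))
--     return found
-- ===== SOURCE B (Python) =====
-- from typing import Dict, List, Sequence
--
-- def collect_new_keywords(body: str, dictionary: List[Dict[str, Sequence[str]]]) -> List[str]: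
--     body_lower = body.lower()
--     # Phase 1: every distinct lowered alias, across all entries.
--     seen = {a.lower() for entry in dictionary for a in entry.get("aliases", [])}
--     # Phase 2: substring-search each distinct alias against the body exactly once.
--     matched = {a for a in seen if a in body_lower}
--     # Phase 3: entries in order; an entry matches iff one of its aliases is in the matched set.
--     found: List[str] = []
--     for entry in dictionary:
--         if any(a.lower() in matched for a in entry.get("aliases", [])):
--             found.extend(entry.get("keywords", []))
--     return found
-- ===== Notes on version B (the rewrite author's own statement) =====
-- stated objective: alternative
-- what changed: B precomputes the set of all distinct lowered aliases, substring-searches each distinct alias against the lowered body exactly once, and then decides each entry by set membership, instead of A's per-entry inner substring scan over every (possibly repeated) alias.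
import Mathlib
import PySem

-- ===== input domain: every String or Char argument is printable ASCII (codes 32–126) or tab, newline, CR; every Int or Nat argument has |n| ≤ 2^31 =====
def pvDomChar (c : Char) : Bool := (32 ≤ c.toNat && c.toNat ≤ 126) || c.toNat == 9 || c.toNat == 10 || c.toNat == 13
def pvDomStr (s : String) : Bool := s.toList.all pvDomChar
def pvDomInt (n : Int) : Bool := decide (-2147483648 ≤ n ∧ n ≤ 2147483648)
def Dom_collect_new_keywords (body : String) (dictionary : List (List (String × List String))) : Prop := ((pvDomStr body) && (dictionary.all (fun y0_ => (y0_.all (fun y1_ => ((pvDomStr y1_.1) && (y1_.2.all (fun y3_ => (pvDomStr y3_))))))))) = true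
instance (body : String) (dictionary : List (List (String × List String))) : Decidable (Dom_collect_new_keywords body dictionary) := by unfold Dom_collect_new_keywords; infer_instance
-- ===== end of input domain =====

-- B restructures A into three phases (collect distinct lowered aliases, substring-search each once, then decide entries by set membership) as an alternative of similar cost; return values proved equal on all inputs.
-- ===== PORT A =====
def collect_new_keywords (body : String) (dictionary : List (List (String × List String))) : List String :=
  let body_lower := PySem.Str.lower body
  dictionary.foldl (fun found entry =>
    let aliases := PySem.Dict.getD (PySem.Dict.mk entry) "aliases" []
    if aliases.isEmpty then found
    else if aliases.any (fun al => PySem.Str.isIn (PySem.Str.lower al) body_lower) then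
      found ++ PySem.Dict.getD (PySem.Dict.mk entry) "keywords" []
    else found) []

-- ===== PORT B =====
def collect_new_keywords_alt (body : String) (dictionary : List (List (String × List String))) : List String :=
  let body_lower := PySem.Str.lower body
  let seen : PySem.Set String :=
    PySem.Set.ofList ((dictionary.flatMap (fun entry => PySem.Dict.getD (PySem.Dict.mk entry) "aliases" [])).map PySem.Str.lower)
  let matched : PySem.Set String := seen.filter (fun a => PySem.Str.isIn a body_lower)
  dictionary.foldl (fun found entry =>
    if (PySem.Dict.getD (PySem.Dict.mk entry) "aliases" []).any
        (fun a => PySem.Set.contains matched (PySem.Str.lower a)) then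
      found ++ PySem.Dict.getD (PySem.Dict.mk entry) "keywords" []
    else found) []

-- ===== PRECONDITION & SPEC =====
def Spec_collect_new_keywords (body : String) (dictionary : List (List (String × List String))) (out : List String) : Prop := out = collect_new_keywords_alt body dictionary
instance (body : String) (dictionary : List (List (String × List String))) (out : List String) : Decidable (Spec_collect_new_keywords body dictionary out) := by unfold Spec_collect_new_keywords; infer_instance

-- ===== CLAIM (what is proved, stated in full; the proofs are below) =====
def Claim_equal_collect_new_keywords : Prop := ∀ (body : String) (dictionary : List (List (String × List String))), Dom_collect_new_keywords body dictionary → Spec_collect_new_keywords body dictionary (collect_new_keywords body dictionary)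

-- ===== LEMMAS AND PROOFS =====

-- Bool-valued any over the same list with pointwise-equal predicates (membership form)
theorem pv_any_congr {α : Type} (l : List α) (p q : α → Bool)
    (h : ∀ a ∈ l, p a = q a) : l.any p = l.any q := by
  induction l with
  | nil => rfl
  | cons x xs ih =>
    simp only [List.any_cons]
    rw [h x (List.mem_cons_self ..), ih (fun a ha => h a (List.mem_cons_of_mem _ ha))]

-- membership of the filtered set decides exactly the substring test, for any alias covered by `seen`
theorem pv_contains_filter (seen : List String) (p : String → Bool) (x : String)
    (hx : x ∈ seen) : PySem.Set.contains (seen.filter p) x = p x := by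
  cases hp : p x
  · simp only [PySem.Set.contains_eq_listContains]
    rw [Bool.eq_false_iff]
    intro hc
    have := List.of_mem_filter (List.mem_of_elem_eq_true hc)
    simp [hp] at this
  · simp only [PySem.Set.contains_eq_listContains]
    exact List.elem_eq_true_of_mem (List.mem_filter.mpr ⟨hx, hp⟩)

-- both folds agree once every alias of every listed entry is decided the same way
theorem pv_fold_eq (body_lower : String) (matched : List String)
    (l : List (List (String × List String)))
    (h : ∀ entry ∈ l, ∀ a ∈ PySem.Dict.getD (PySem.Dict.mk entry) "aliases" ([] : List String),
      PySem.Set.contains matched (PySem.Str.lower a) = PySem.Str.isIn (PySem.Str.lower a) body_lower) :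
    ∀ acc : List String,
      l.foldl (fun found entry =>
        let aliases := PySem.Dict.getD (PySem.Dict.mk entry) "aliases" []
        if aliases.isEmpty then found
        else if aliases.any (fun al => PySem.Str.isIn (PySem.Str.lower al) body_lower) then
          found ++ PySem.Dict.getD (PySem.Dict.mk entry) "keywords" []
        else found) acc
      =
      l.foldl (fun found entry =>
        if (PySem.Dict.getD (PySem.Dict.mk entry) "aliases" ([] : List String)).any
            (fun a => PySem.Set.contains matched (PySem.Str.lower a)) then
          found ++ PySem.Dict.getD (PySem.Dict.mk entry) "keywords" []
        else found) acc := by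
  induction l with
  | nil => intro acc; rfl
  | cons e rest ih =>
    intro acc
    have he : ∀ a ∈ PySem.Dict.getD (PySem.Dict.mk e) "aliases" ([] : List String),
        PySem.Set.contains matched (PySem.Str.lower a) = PySem.Str.isIn (PySem.Str.lower a) body_lower :=
      h e (List.mem_cons_self ..)
    have hrest : ∀ entry ∈ rest, ∀ a ∈ PySem.Dict.getD (PySem.Dict.mk entry) "aliases" ([] : List String),
        PySem.Set.contains matched (PySem.Str.lower a) = PySem.Str.isIn (PySem.Str.lower a) body_lower :=
      fun entry hm => h entry (List.mem_cons_of_mem _ hm)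
    simp only [List.foldl_cons]
    rw [ih hrest]
    congr 1
    have hany : (PySem.Dict.getD (PySem.Dict.mk e) "aliases" ([] : List String)).any
          (fun a => PySem.Set.contains matched (PySem.Str.lower a))
        = (PySem.Dict.getD (PySem.Dict.mk e) "aliases" ([] : List String)).any
          (fun al => PySem.Str.isIn (PySem.Str.lower al) body_lower) :=
      pv_any_congr _ _ _ (fun a ha => he a ha)
    cases hemp : (PySem.Dict.getD (PySem.Dict.mk e) "aliases" ([] : List String)).isEmpty
    · simp only [Bool.false_eq_true, if_false, hany]
    · have : (PySem.Dict.getD (PySem.Dict.mk e) "aliases" ([] : List String)) = [] :=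
        List.isEmpty_iff.mp hemp
      simp [this]

-- ===== VERDICT (by name: the statement is the Claim_ definition above) =====
theorem collect_new_keywords_spec : Claim_equal_collect_new_keywords := by
  intro body dictionary _
  unfold Spec_collect_new_keywords collect_new_keywords collect_new_keywords_alt
  apply pv_fold_eq
  intro entry hentry a ha
  apply pv_contains_filter
  rw [PySem.Set.mem_ofList]
  exact List.mem_map.mpr ⟨a, List.mem_flatMap.mpr ⟨entry, hentry, ha⟩, rfl⟩
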